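-- pv_equiv track=rewrite | github.com/grekys84/gmn_project | infrastructure/utils/augmentation/gap_svg.py | build_modified_commands
-- ===== SOURCE A (Python) =====
-- def build_modified_commands(
--     commands, selected_edge, break1_point, break2_point
-- ):
--     """Создает модифицированные команды пути."""
--     new_commands = []
--     break1_x, break1_y = break1_point
--     break2_x, break2_y = break2_point
--
--     for i, (cmd, args) in enumerate(commands):
--         if i == selected_edge["cmd_idx"]:
--             new_commands.append((cmd, [break1_x, break1_y]))
--             new_commands.append(("M", [break2_x, break2_y]))
--             new_commands.append(("L", args))
--         else:
--             new_commands.append((cmd, args))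
--     return new_commands
-- ===== SOURCE B (Python) =====
-- def build_modified_commands(
--     commands, selected_edge, break1_point, break2_point
-- ):
--     """Splice the break commands in by position instead of scanning every element."""
--     idx = selected_edge["cmd_idx"]
--     if 0 <= idx < len(commands):
--         cmd, args = commands[idx]
--         return (
--             list(commands[:idx])
--             + [
--                 (cmd, [break1_point[0], break1_point[1]]),
--                 ("M", [break2_point[0], break2_point[1]]),
--                 ("L", args),
--             ]
--             + list(commands[idx + 1:])
--         )
--     return list(commands)
-- ===== Notes on version B (the rewrite author's own statement) =====
-- stated objective: simpler
-- what changed: B replaces A's element-by-element enumerate loop that compares every index with a single positional splice: slice before idx, the three break commands, slice after idx, returning a plain copy when idx is out of range.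
-- outside the precondition, e.g. on build_modified_commands([], {}, (0, 0), (0, 0)): A returns [], B raises KeyError
import Mathlib
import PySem

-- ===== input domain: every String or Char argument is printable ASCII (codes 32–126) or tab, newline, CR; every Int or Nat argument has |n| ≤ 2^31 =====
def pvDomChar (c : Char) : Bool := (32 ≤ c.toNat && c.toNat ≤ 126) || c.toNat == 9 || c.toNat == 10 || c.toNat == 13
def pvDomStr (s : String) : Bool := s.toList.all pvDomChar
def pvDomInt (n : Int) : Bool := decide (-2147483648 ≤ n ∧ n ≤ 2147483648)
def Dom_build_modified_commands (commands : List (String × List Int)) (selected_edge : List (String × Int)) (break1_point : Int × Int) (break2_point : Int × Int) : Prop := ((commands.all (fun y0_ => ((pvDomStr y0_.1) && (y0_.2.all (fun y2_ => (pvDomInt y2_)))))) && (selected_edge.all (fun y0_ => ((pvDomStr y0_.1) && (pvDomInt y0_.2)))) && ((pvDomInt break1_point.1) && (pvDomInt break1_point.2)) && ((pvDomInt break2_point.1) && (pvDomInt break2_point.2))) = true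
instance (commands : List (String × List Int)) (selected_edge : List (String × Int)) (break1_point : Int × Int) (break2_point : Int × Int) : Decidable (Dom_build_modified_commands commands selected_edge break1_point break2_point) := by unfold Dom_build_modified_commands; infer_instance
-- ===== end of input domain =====

-- B replaces A's enumerate-and-compare loop with one positional slice-and-concatenate; simpler decomposition, same cost.

-- ===== PORT A =====
-- the for-enumerate loop of A: appends one or three commands per element, counter i goes up by one each step

def pvALoop (idx : Int) (b1 b2 : Int × Int) : Nat → List (String × List Int) → List (String × List Int)
  | _, [] => []
  | i, (cmd, args) :: rest =>
      (if (i : Int) = idx then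
        [(cmd, [b1.1, b1.2]), ("M", [b2.1, b2.2]), ("L", args)]
      else
        [(cmd, args)]) ++ pvALoop idx b1 b2 (i + 1) rest


def build_modified_commands (commands : List (String × List Int)) (selected_edge : List (String × Int)) (break1_point : Int × Int) (break2_point : Int × Int) : List (String × List Int) :=
  let idx := ((PySem.Dict.mk selected_edge).get? "cmd_idx").getD 0  -- selected_edge["cmd_idx"]; Pre_ guarantees the key is present
  pvALoop idx break1_point break2_point 0 commands

-- ===== PORT B =====
def build_modified_commands_alt (commands : List (String × List Int)) (selected_edge : List (String × Int)) (break1_point : Int × Int) (break2_point : Int × Int) : List (String × List Int) :=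
  let idx := ((PySem.Dict.mk selected_edge).get? "cmd_idx").getD 0
  if 0 ≤ idx ∧ idx < commands.length then
    match PySem.List.pyGet? commands idx with
    | some (cmd, args) =>
        PySem.List.slice commands none (some idx)
          ++ [(cmd, [break1_point.1, break1_point.2]),
              ("M", [break2_point.1, break2_point.2]),
              ("L", args)]
          ++ PySem.List.slice commands (some (idx + 1)) none
    | none => commands
  else
    commands

-- ===== PRECONDITION & SPEC =====
-- Pre_ excludes inputs whose selected_edge dict lacks a "cmd_idx" key: A raises KeyError there
-- (except in the accidental empty-commands corner, where A's loop never evaluates the lookup), and B raises KeyError.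
def Pre_build_modified_commands (commands : List (String × List Int)) (selected_edge : List (String × Int)) (break1_point : Int × Int) (break2_point : Int × Int) : Prop :=
  ((PySem.Dict.mk selected_edge).get? "cmd_idx").isSome = true
instance (commands : List (String × List Int)) (selected_edge : List (String × Int)) (break1_point : Int × Int) (break2_point : Int × Int) : Decidable (Pre_build_modified_commands commands selected_edge break1_point break2_point) := by unfold Pre_build_modified_commands; infer_instance

def pvWitness_build_modified_commands : (List (String × List Int)) × (List (String × Int)) × (Int × Int) × (Int × Int) :=
  ([("M", [1, 2]), ("L", [3, 4])], [("cmd_idx", 1)], (10, 11), (12, 13))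

def Spec_build_modified_commands (commands : List (String × List Int)) (selected_edge : List (String × Int)) (break1_point : Int × Int) (break2_point : Int × Int) (out : List (String × List Int)) : Prop := out = build_modified_commands_alt commands selected_edge break1_point break2_point
instance (commands : List (String × List Int)) (selected_edge : List (String × Int)) (break1_point : Int × Int) (break2_point : Int × Int) (out : List (String × List Int)) : Decidable (Spec_build_modified_commands commands selected_edge break1_point break2_point out) := by unfold Spec_build_modified_commands; infer_instance

-- ===== CLAIM (what is proved, stated in full; the proofs are below) =====
def Claim_equal_build_modified_commands : Prop := ∀ (commands : List (String × List Int)) (selected_edge : List (String × Int)) (break1_point : Int × Int) (break2_point : Int × Int), Dom_build_modified_commands commands selected_edge break1_point break2_point → Pre_build_modified_commands commands selected_edge break1_point break2_point → Spec_build_modified_commands commands selected_edge break1_point break2_point (build_modified_commands commands selected_edge break1_point break2_point)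

-- ===== LEMMAS AND PROOFS =====
theorem pvALoop_copy (idx : Int) (b1 b2 : Int × Int) (cs : List (String × List Int)) :
    ∀ i : Nat, idx < (i : Int) → pvALoop idx b1 b2 i cs = cs := by
  induction cs with
  | nil => intro i _; rfl
  | cons hd tl ih =>
      intro i hi
      obtain ⟨cmd, args⟩ := hd
      rw [pvALoop, if_neg (show ¬((i : Int) = idx) by omega),
        ih (i + 1) (by push_cast; omega)]
      rfl

theorem pvALoop_splice (idx : Int) (b1 b2 : Int × Int) (cs : List (String × List Int)) :
    ∀ i : Nat, (i : Int) ≤ idx →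
      pvALoop idx b1 b2 i cs =
        if idx < (i : Int) + cs.length then
          match cs[(idx - i).toNat]? with
          | some (cmd, args) =>
              cs.take (idx - i).toNat
                ++ [(cmd, [b1.1, b1.2]), ("M", [b2.1, b2.2]), ("L", args)]
                ++ cs.drop ((idx - i).toNat + 1)
          | none => cs
        else cs := by
  induction cs with
  | nil =>
      intro i hi
      rw [pvALoop, if_neg (by simp; omega)]
  | cons hd tl ih =>
      intro i hi
      obtain ⟨cmd, args⟩ := hd
      by_cases hhit : (i : Int) = idx
      · have h0 : (idx - i).toNat = 0 := by omega
        rw [pvALoop, if_pos hhit, pvALoop_copy idx b1 b2 tl (i + 1) (by push_cast; omega),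
          if_pos (by simp; omega)]
        simp [h0]
      · have hgt : (i : Int) < idx := lt_of_le_of_ne hi hhit
        rw [pvALoop, if_neg hhit, ih (i + 1) (by push_cast; omega)]
        have hk : (idx - ((i : Int) + 1)).toNat + 1 = (idx - i).toNat := by omega
        push_cast
        by_cases hlt : idx < (i : Int) + 1 + tl.length
        · rw [if_pos hlt, if_pos (by simp; omega)]
          have hidx : ((cmd, args) :: tl)[(idx - i).toNat]? = tl[(idx - ((i:Int) + 1)).toNat]? := by
            rw [← hk]; simp
          rw [hidx]
          cases htl : tl[(idx - ((i:Int) + 1)).toNat]? with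
          | none => simp
          | some p =>
              obtain ⟨c, a⟩ := p
              simp only
              rw [← hk]
              simp
        · rw [if_neg hlt, if_neg (by simp; omega)]
          rfl

-- ===== VERDICT (by name: the statement is the Claim_ definition above) =====
theorem build_modified_commands_spec : Claim_equal_build_modified_commands := by
  intro commands selected_edge b1 b2 _ _
  show build_modified_commands commands selected_edge b1 b2
      = build_modified_commands_alt commands selected_edge b1 b2
  unfold build_modified_commands build_modified_commands_alt
  set idx := ((PySem.Dict.mk selected_edge).get? "cmd_idx").getD 0 with hidx
  by_cases hle : 0 ≤ idx
  · rw [pvALoop_splice idx b1 b2 commands 0 (by exact_mod_cast hle)]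
    by_cases hlt : idx < (commands.length : Int)
    · rw [if_pos (by push_cast; omega), if_pos ⟨hle, hlt⟩]
      have hget : PySem.List.pyGet? commands idx = commands[(idx - ((0 : Nat) : Int)).toNat]? := by
        simp [PySem.List.pyGet?, PySem.List.pyIdx?, hle, hlt]
      rw [hget]
      cases hc : commands[(idx - ((0 : Nat) : Int)).toNat]? with
      | none => rfl
      | some p =>
          obtain ⟨c, a⟩ := p
          simp only
          have h1 : PySem.List.slice commands none (some idx)
              = commands.take (idx - ((0 : Nat) : Int)).toNat := by
            have he : idx = ((idx.toNat : Nat) : Int) := by omega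
            rw [he, PySem.List.slice_to_natCast]
            congr 1
          have h2 : PySem.List.slice commands (some (idx + 1)) none
              = commands.drop ((idx - ((0 : Nat) : Int)).toNat + 1) := by
            have he : idx + 1 = ((idx.toNat + 1 : Nat) : Int) := by push_cast; omega
            rw [he, PySem.List.slice_from_natCast]
            congr 1; omega
          rw [h1, h2]
    · rw [if_neg (by push_cast; omega), if_neg (by push Not; intro _; omega)]
  · rw [pvALoop_copy idx b1 b2 commands 0 (by push_cast; omega),
        if_neg (by push Not; intro h; omega)]
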